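-- pv_equiv track=rewrite | github.com/pbelskiy/contest | leetcode.com/2457_minimum_addition_to_make_integer_beautiful/solution.py | makeIntegerBeautiful
-- ===== SOURCE A (Python) =====
-- def makeIntegerBeautiful(n: int, target: int) -> int:
--     a = list(map(int, str(n)))
--     s = sum(a)
--
--     if s <= target:
--         return 0
--
--     d = 1
--     t = 0
--
--     while s > target:
--         v = 10 - a[len(a) - d]
--
--         s -= a[len(a) - d]
--         s += 1
--
--         t += v*(10**(d - 1))
--
--         a[len(a) - (d + 1)] += 1
--         d += 1
--
--     return t
-- ===== SOURCE B (Python) =====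
-- def _digit_sum(m):
--     s = 0
--     while m:
--         s += m % 10
--         m //= 10
--     return s
--
--
-- def makeIntegerBeautiful(n: int, target: int) -> int:
--     # Try rounding n up to the next multiple of 10**k for k = 0, 1, 2, ...;
--     # the first candidate whose digit sum is small enough wins.
--     p = 1
--     while True:
--         c = ((n + p - 1) // p) * p
--         if _digit_sum(c) <= target:
--             return c - n
--         p *= 10
-- ===== Notes on version B (the rewrite author's own statement) =====
-- stated objective: simpler
-- what changed: Replaces A's mutable digit-list with incrementally maintained running sum and hand-made carries by pure integer arithmetic: round n up to the next multiple of 10**k and recompute the digit sum of the candidate, for k = 0, 1, 2, ...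
-- outside the precondition, e.g. on makeIntegerBeautiful(11, 0): A returns 889, B does not finish within the time limit
import Mathlib
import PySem

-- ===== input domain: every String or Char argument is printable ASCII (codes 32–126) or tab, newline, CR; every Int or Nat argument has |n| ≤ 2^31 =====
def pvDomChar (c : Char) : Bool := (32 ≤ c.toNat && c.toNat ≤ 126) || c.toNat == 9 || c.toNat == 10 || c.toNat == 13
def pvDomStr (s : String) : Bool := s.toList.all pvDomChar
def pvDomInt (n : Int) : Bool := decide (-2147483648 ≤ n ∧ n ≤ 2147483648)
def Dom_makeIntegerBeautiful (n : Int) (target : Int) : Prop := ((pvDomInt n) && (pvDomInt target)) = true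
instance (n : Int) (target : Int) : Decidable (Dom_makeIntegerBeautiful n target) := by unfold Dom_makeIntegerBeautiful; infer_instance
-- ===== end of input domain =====

-- B replaces A's mutable digit list with incrementally maintained running sum and hand-made
-- carries by pure integer arithmetic: round n up to the next multiple of 10^k and recompute
-- the digit sum of the candidate, for k = 0, 1, 2, ...; objective: simpler.

-- ===== PORT A =====

-- int(ch) for a single digit character (exact on '0'..'9'; other characters, excluded by Pre_, raise in Python)
def pvCharInt (c : Char) : Int := (c.toNat : Int) - 48

-- the while loop of A; fuel is a guard only (under Pre_ the loop exits within a.length iterations)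
def aLoop : Nat → List Int → Int → Int → Int → Int → Int
  | 0, _, _, _, t, _ => t
  | f + 1, a, s, d, t, target =>
    if s > target then
      let av := (PySem.List.pyGet? a (PySem.List.len a - d)).getD 0  -- a[len(a) - d]; in range under Pre_
      let v := 10 - av
      let s' := s - av + 1
      let t' := t + v * 10 ^ (d - 1).toNat                           -- v * 10**(d-1); exact since d ≥ 1
      let idx := PySem.List.len a - (d + 1)
      let a' := PySem.List.pySetD a idx ((PySem.List.pyGet? a idx).getD 0 + 1)  -- a[len(a)-(d+1)] += 1
      aLoop f a' s' (d + 1) t' target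
    else t

def makeIntegerBeautiful (n : Int) (target : Int) : Int :=
  let a := (PySem.Int.toChars n).map pvCharInt   -- list(map(int, str(n)))
  let s := a.sum                                 -- sum(a)
  if s ≤ target then 0
  else aLoop (a.length + 1) a s 1 0 target

-- ===== PORT B =====

-- _digit_sum (exact for m ≥ 0; B only forms nonnegative candidates under Pre_)
def digsumB (c : Nat) : Nat :=
  if c = 0 then 0 else c % 10 + digsumB (c / 10)
decreasing_by exact Nat.div_lt_self (Nat.pos_of_ne_zero (by assumption)) (by norm_num)

-- the while True loop of B; fuel is a guard only (the loop exits once 10^k exceeds n)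
def bLoop : Nat → Int → Int → Int → Int
  | 0, _, _, _ => 0
  | f + 1, n, target, p =>
    let c := PySem.Int.floordiv (n + p - 1) p * p
    if (digsumB c.toNat : Int) ≤ target then c - n
    else bLoop f n target (p * 10)

def makeIntegerBeautiful_alt (n : Int) (target : Int) : Int :=
  bLoop (n.toNat + 1) n target 1

-- ===== PRECONDITION & SPEC =====
-- Pre_ excludes n < 0, where A raises ValueError (int('-')), and target ≤ 0, where A raises
-- IndexError or returns an accidental value produced by negative-index wraparound while B's
-- loop never finds a candidate and diverges (cited example: (11, 0)).
def Pre_makeIntegerBeautiful (n : Int) (target : Int) : Prop := 0 ≤ n ∧ 1 ≤ target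
instance (n : Int) (target : Int) : Decidable (Pre_makeIntegerBeautiful n target) := by
  unfold Pre_makeIntegerBeautiful; infer_instance

def pvWitness_makeIntegerBeautiful : Int × Int := (95, 1)

def Spec_makeIntegerBeautiful (n : Int) (target : Int) (out : Int) : Prop := out = makeIntegerBeautiful_alt n target
instance (n : Int) (target : Int) (out : Int) : Decidable (Spec_makeIntegerBeautiful n target out) := by
  unfold Spec_makeIntegerBeautiful; infer_instance

-- ===== CLAIM (what is proved, stated in full; the proofs are below) =====
def Claim_equal_makeIntegerBeautiful : Prop := ∀ (n : Int) (target : Int), Dom_makeIntegerBeautiful n target → Pre_makeIntegerBeautiful n target → Spec_makeIntegerBeautiful n target (makeIntegerBeautiful n target)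

-- ===== LEMMAS AND PROOFS =====

-- digit sum of a natural number
def ds (m : Nat) : Nat := (Nat.digits 10 m).sum

-- decimal digits of m, most significant first, as Ints (the list A builds)
def revD (m : Nat) : List Int := (Nat.digits 10 m).reverse.map (fun d : Nat => (d : Int))

-- closed form of A's loop tail
def hA (t : Int) (m : Nat) : Nat :=
  if m = 0 then 0
  else if (ds m : Int) + 1 ≤ t then 0
  else 10 * hA t (m / 10) + (9 - m % 10)
decreasing_by exact Nat.div_lt_self (Nat.pos_of_ne_zero (by assumption)) (by norm_num)

-- closed form of B's loop
def gB (t : Int) (m : Nat) : Nat :=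
  if m ≤ 1 then (if (ds m : Int) ≤ t then m else 0)
  else if (ds m : Int) ≤ t then m
  else 10 * gB t ((m + 9) / 10)
decreasing_by exact Nat.div_lt_of_lt_mul (by omega)

lemma ds_zero : ds 0 = 0 := by simp [ds]

lemma ds_def (m : Nat) (hm : 0 < m) : ds m = m % 10 + ds (m / 10) := by
  unfold ds
  rw [Nat.digits_def' (by norm_num : (1:Nat) < 10) hm]
  simp

lemma ds_small (m : Nat) (hm : m < 10) : ds m = m := by
  rcases Nat.eq_zero_or_pos m with h | h
  · simp [h, ds_zero]
  · rw [ds_def m h, Nat.mod_eq_of_lt hm, Nat.div_eq_of_lt hm, ds_zero]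
    omega

lemma ds_succ_not9 (m : Nat) (h : m % 10 ≠ 9) : ds (m + 1) = ds m + 1 := by
  rcases Nat.eq_zero_or_pos m with h0 | h0
  · subst h0; simp [ds_zero, ds_small 1 (by norm_num)]
  · rw [ds_def (m + 1) (by omega), ds_def m h0]
    have h1 : (m + 1) % 10 = m % 10 + 1 := by omega
    have h2 : (m + 1) / 10 = m / 10 := by omega
    rw [h1, h2]; ring

lemma ds_succ_9 (m : Nat) (h : m % 10 = 9) : ds (m + 1) = ds (m / 10 + 1) := by
  rw [ds_def (m + 1) (by omega)]
  have h1 : (m + 1) % 10 = 0 := by omega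
  have h2 : (m + 1) / 10 = m / 10 + 1 := by omega
  rw [h1, h2]; ring

lemma ds_le_succ (m : Nat) : ds (m + 1) ≤ ds m + 1 := by
  induction m using Nat.strong_induction_on with
  | _ m ih =>
    by_cases h : m % 10 = 9
    · rw [ds_succ_9 m h, ds_def m (by omega)]
      have := ih (m / 10) (by omega)
      omega
    · rw [ds_succ_not9 m h]

lemma ds_mul_pow10 (m k : Nat) : ds (m * 10 ^ k) = ds m := by
  induction k with
  | zero => simp
  | succ k ih =>
    rcases Nat.eq_zero_or_pos m with h | h
    · simp [h]
    · have h1 : 0 < m * 10 ^ (k + 1) := by positivity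
      rw [ds_def _ h1]
      have h2 : m * 10 ^ (k + 1) = (m * 10 ^ k) * 10 := by ring
      have h3 : m * 10 ^ k * 10 / 10 = m * 10 ^ k := by omega
      rw [h2, Nat.mul_mod_left, h3, ih]
      omega

lemma digsumB_eq_ds (c : Nat) : digsumB c = ds c := by
  induction c using Nat.strong_induction_on with
  | _ c ih =>
    rw [digsumB]
    rcases Nat.eq_zero_or_pos c with h | h
    · simp [h, ds_zero]
    · rw [if_neg (by omega), ih (c / 10) (by omega), ds_def c h]

lemma revD_zero : revD 0 = [] := by simp [revD]

lemma revD_def (m : Nat) (hm : 0 < m) :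
    revD m = revD (m / 10) ++ [((m % 10 : Nat) : Int)] := by
  unfold revD
  rw [Nat.digits_def' (by norm_num : (1:Nat) < 10) hm]
  simp

lemma cast_sum_aux : ∀ (l : List Nat), (l.map (fun d : Nat => (d : Int))).sum = (l.sum : Int) := by
  intro l
  induction l with
  | nil => simp
  | cons a l ih => simp_all

lemma revD_sum (m : Nat) : (revD m).sum = (ds m : Int) := by
  unfold revD ds
  rw [cast_sum_aux, List.sum_reverse]

-- the g-recursion equals the h-recursion shifted by one (main arithmetic lemma)
lemma gB_succ_eq (t : Int) (ht : 1 ≤ t) (m : Nat) : gB t (m + 1) = m + 1 + hA t m := by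
  induction m using Nat.strong_induction_on with
  | _ m ih =>
    by_cases hle : (ds m : Int) + 1 ≤ t
    · have hds := ds_le_succ m
      have h1 : (ds (m + 1) : Int) ≤ t := by omega
      have h2 : hA t m = 0 := by
        rw [hA]
        by_cases h : m = 0
        · simp [h]
        · rw [if_neg h, if_pos hle]
      rw [h2, gB]
      by_cases hm1 : m + 1 ≤ 1
      · rw [if_pos hm1, if_pos h1]
      · rw [if_neg hm1, if_pos h1]
    · have hm0 : 0 < m := by
        rcases Nat.eq_zero_or_pos m with h | h
        · subst h; simp [ds_zero] at hle; omega
        · exact h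
      have hhA : hA t m = 10 * hA t (m / 10) + (9 - m % 10) := by
        rw [hA, if_neg (by omega), if_neg hle]
      have hIH : gB t (m / 10 + 1) = m / 10 + 1 + hA t (m / 10) :=
        ih (m / 10) (by omega)
      by_cases h9 : m % 10 = 9
      · have hq : (m + 1 + 9) / 10 = m / 10 + 1 := by omega
        have hstep : gB t (m + 1) = 10 * gB t (m / 10 + 1) := by
          by_cases hds : (ds (m + 1) : Int) ≤ t
          · have hds' : ds (m / 10 + 1) = ds (m + 1) := (ds_succ_9 m h9).symm
            rw [gB, if_neg (by omega), if_pos hds, gB]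
            have hle2 : (ds (m / 10 + 1) : Int) ≤ t := by rw [hds']; exact hds
            by_cases hsm : m / 10 + 1 ≤ 1
            · rw [if_pos hsm, if_pos hle2]; omega
            · rw [if_neg hsm, if_pos hle2]; omega
          · rw [gB, if_neg (by omega), if_neg hds, hq]
        rw [hstep, hIH, hhA]; omega
      · have hds : ¬ (ds (m + 1) : Int) ≤ t := by
          have := ds_succ_not9 m h9; omega
        have hq : (m + 1 + 9) / 10 = m / 10 + 1 := by omega
        have hstep : gB t (m + 1) = 10 * gB t (m / 10 + 1) := by
          rw [gB, if_neg (by omega), if_neg hds, hq]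
        rw [hstep, hIH, hhA]; omega

-- the same statement at m itself, valid when the digit sum of m is already too big
lemma gB_eq_of_big (t : Int) (ht : 1 ≤ t) (m : Nat) (hbig : t < (ds m : Int)) :
    gB t m = m + 1 + hA t m := by
  induction m using Nat.strong_induction_on with
  | _ m ih =>
    have hm2 : 2 ≤ m := by
      by_contra h
      push_neg at h
      interval_cases m
      · rw [ds_zero] at hbig; omega
      · rw [ds_small 1 (by norm_num)] at hbig; omega
    have hhA : hA t m = 10 * hA t (m / 10) + (9 - m % 10) := by
      rw [hA, if_neg (by omega), if_neg (by omega)]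
    have hstep : gB t m = 10 * gB t ((m + 9) / 10) := by
      rw [gB, if_neg (by omega), if_neg (by omega)]
    by_cases h0 : m % 10 = 0
    · have hq : (m + 9) / 10 = m / 10 := by omega
      have hds10 : ds (m / 10) = ds m := by
        have := ds_def m (by omega)
        omega
      have hIH : gB t (m / 10) = m / 10 + 1 + hA t (m / 10) :=
        ih (m / 10) (by omega) (by rw [hds10]; exact hbig)
      rw [hstep, hq, hIH, hhA]; omega
    · have hq : (m + 9) / 10 = m / 10 + 1 := by omega
      have hM : gB t (m / 10 + 1) = m / 10 + 1 + hA t (m / 10) := gB_succ_eq t ht (m / 10)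
      rw [hstep, hq, hM, hhA]; omega

-- ceiling division composes: ⌈x / (a·10)⌉ = ⌈⌈x/a⌉ / 10⌉
lemma ceil_compose (x a : Nat) (ha : 0 < a) :
    (x + a * 10 - 1) / (a * 10) = ((x + a - 1) / a + 9) / 10 := by
  rcases Nat.eq_zero_or_pos x with h | h
  · subst h
    have e1 : (0 + a - 1) / a = 0 := Nat.div_eq_of_lt (by omega)
    have e2 : (0 + a * 10 - 1) / (a * 10) = 0 := Nat.div_eq_of_lt (by omega)
    rw [e1, e2]
  · have h1 : x + a - 1 = (x - 1) + a := by omega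
    have h2 : x + a * 10 - 1 = (x - 1) + a * 10 := by omega
    have ha10 : 0 < a * 10 := by omega
    rw [h1, h2, Nat.add_div_right _ ha, Nat.add_div_right _ ha10]
    have h3 : (x - 1) / a + 1 + 9 = (x - 1) / a + 10 := by omega
    rw [h3, Nat.add_div_right _ (by norm_num), Nat.div_div_eq_div_mul]

-- B's loop computes the g-recursion
lemma bLoop_eq (t : Int) (ht : 1 ≤ t) (nN : Nat) :
    ∀ fuel k, (nN + 10 ^ k - 1) / 10 ^ k ≤ fuel →
      bLoop fuel (nN : Int) t ((10 : Int) ^ k)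
        = (gB t ((nN + 10 ^ k - 1) / 10 ^ k) : Int) * 10 ^ k - nN := by
  intro fuel
  induction fuel with
  | zero =>
    intro k hk
    have hp : 0 < 10 ^ k := by positivity
    have h0 : nN = 0 := by
      by_contra h
      have : 1 ≤ (nN + 10 ^ k - 1) / 10 ^ k := (Nat.one_le_div_iff hp).mpr (by omega)
      omega
    subst h0
    have hm : (0 + 10 ^ k - 1) / 10 ^ k = 0 := Nat.div_eq_of_lt (by omega)
    rw [hm]
    have : gB t 0 = 0 := by rw [gB]; simp [ds_zero]
    simp [bLoop, this]
  | succ f ih =>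
    intro k hk
    have hp : 0 < 10 ^ k := by positivity
    set m := (nN + 10 ^ k - 1) / 10 ^ k with hm
    have hcast : ((10 : Int) ^ k) = ((10 ^ k : Nat) : Int) := by push_cast; ring
    have hc : PySem.Int.floordiv ((nN : Int) + (10 : Int) ^ k - 1) ((10 : Int) ^ k)
        = ((m : Nat) : Int) := by
      have h1 : ((nN : Int) + (10 : Int) ^ k - 1) = ((nN + 10 ^ k - 1 : Nat) : Int) := by
        omega
      rw [h1, hcast, PySem.Int.floordiv_natCast]
    rw [bLoop]
    simp only [hc]
    have hcn : ((m : Nat) : Int) * (10 : Int) ^ k = ((m * 10 ^ k : Nat) : Int) := by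
      norm_cast
    rw [hcn, Int.toNat_natCast, digsumB_eq_ds, ds_mul_pow10]
    by_cases hds : (ds m : Int) ≤ t
    · rw [if_pos hds]
      have hgB : gB t m = m := by
        rw [gB]
        by_cases h1 : m ≤ 1
        · rw [if_pos h1, if_pos hds]
        · rw [if_neg h1, if_pos hds]
      rw [hgB]; push_cast; ring
    · rw [if_neg hds]
      have hm2 : 2 ≤ m := by
        by_contra h
        push_neg at h
        interval_cases m
        · rw [ds_zero] at hds; omega
        · rw [ds_small 1 (by norm_num)] at hds; omega
      have hnext : (nN + 10 ^ (k + 1) - 1) / 10 ^ (k + 1) = (m + 9) / 10 := by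
        rw [hm, ← ceil_compose nN (10 ^ k) hp]
        congr 1
      have hfuel : (nN + 10 ^ (k + 1) - 1) / 10 ^ (k + 1) ≤ f := by
        rw [hnext]; omega
      have hmul : (10 : Int) ^ k * 10 = 10 ^ (k + 1) := by ring
      rw [hmul, ih (k + 1) hfuel, hnext]
      have hgB : gB t m = 10 * gB t ((m + 9) / 10) := by
        rw [gB, if_neg (by omega), if_neg hds]
      rw [hgB]; push_cast; ring

-- small list helper: setting the element just after a prefix
lemma set_append_len {α : Type} (xs : List α) (y v : α) (ys : List α) :
    (xs ++ y :: ys).set xs.length v = xs ++ v :: ys := by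
  induction xs with
  | nil => simp
  | cons a l ih => simp [ih]

-- the addition accumulated by A after k iterations
def W (n k : Nat) : Int := ((n / 10 ^ k + 1 : Nat) : Int) * (10 : Int) ^ k - (n : Int)

lemma W_step (n k : Nat) :
    W n k + (10 - (((n / 10 ^ k) % 10 : Nat) : Int) - 1) * (10 : Int) ^ k = W n (k + 1) := by
  unfold W
  have hdiv : n / 10 ^ (k + 1) = (n / 10 ^ k) / 10 := by
    rw [pow_succ, ← Nat.div_div_eq_div_mul]
  rw [hdiv]
  have key : ((n / 10 ^ k + 1 : Nat) : Int) + (10 - (((n / 10 ^ k) % 10 : Nat) : Int) - 1)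
      = (((n / 10 ^ k) / 10 + 1 : Nat) : Int) * 10 := by
    push_cast
    omega
  have expand : (((n / 10 ^ k) / 10 + 1 : Nat) : Int) * (10 : Int) ^ (k + 1)
      = ((((n / 10 ^ k) / 10 + 1 : Nat) : Int) * 10) * (10 : Int) ^ k := by ring
  rw [expand, ← key]
  ring

-- unfolding A's loop one step
lemma aLoop_step (f : Nat) (a : List Int) (s d t target : Int) (h : s > target) :
    aLoop (f + 1) a s d t target =
      aLoop f
        (PySem.List.pySetD a (PySem.List.len a - (d + 1))
          ((PySem.List.pyGet? a (PySem.List.len a - (d + 1))).getD 0 + 1))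
        (s - (PySem.List.pyGet? a (PySem.List.len a - d)).getD 0 + 1)
        (d + 1)
        (t + (10 - (PySem.List.pyGet? a (PySem.List.len a - d)).getD 0) * 10 ^ (d - 1).toNat)
        target := by
  rw [aLoop, if_pos h]

lemma aLoop_exit (f : Nat) (a : List Int) (s d t target : Int) (h : ¬ s > target) :
    aLoop (f + 1) a s d t target = t := by
  rw [aLoop, if_neg h]

-- A's loop from state k computes the h-recursion
lemma aLoop_eq (t : Int) (ht : 1 ≤ t) (n : Nat) :
    ∀ fuel k (rest : List Int), rest.length = k → 1 ≤ k →
      (Nat.digits 10 (n / 10 ^ k)).length + 1 ≤ fuel →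
      aLoop fuel (revD (n / 10 ^ (k + 1)) ++ ((((n / 10 ^ k) % 10 : Nat) : Int) + 1) :: rest)
        ((ds (n / 10 ^ k) : Int) + 1) ((k : Int) + 1) (W n k) t
        = (10 : Int) ^ k * (hA t (n / 10 ^ k) : Int) + W n k := by
  intro fuel
  induction fuel with
  | zero => intro k rest h1 h2 h3; omega
  | succ f ih =>
    intro k rest hrest hk hfuel
    set m0 := n / 10 ^ k with hm0
    have hdd : n / 10 ^ (k + 1) = m0 / 10 := by
      rw [hm0, pow_succ, ← Nat.div_div_eq_div_mul]
    by_cases hcont : (ds m0 : Int) + 1 > t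
    · have hm0pos : 0 < m0 := by
        rcases Nat.eq_zero_or_pos m0 with h | h
        · rw [h, ds_zero] at hcont; push_cast at hcont; omega
        · exact h
      set pre := revD (n / 10 ^ (k + 1)) with hpre
      set cur := (((m0 % 10 : Nat) : Int) + 1) with hcur
      have hlen : PySem.List.len (pre ++ cur :: rest) = (pre.length : Int) + 1 + k := by
        have hl : (pre ++ cur :: rest).length = pre.length + 1 + k := by
          simp [hrest]
          omega
        rw [PySem.List.len_eq, hl]
        push_cast
        ring
      have hidx : PySem.List.len (pre ++ cur :: rest) - ((k : Int) + 1) = (pre.length : Int) := by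
        rw [hlen]; ring
      have hread : (PySem.List.pyGet? (pre ++ cur :: rest)
          (PySem.List.len (pre ++ cur :: rest) - ((k : Int) + 1))).getD 0 = cur := by
        rw [hidx, PySem.List.pyGet?_append_length]
        rfl
      have hds0 : ds m0 = m0 % 10 + ds (m0 / 10) := ds_def m0 hm0pos
      have hs' : (ds m0 : Int) + 1 - cur + 1 = (ds (m0 / 10) : Int) + 1 := by
        rw [hcur]; push_cast [hds0]; ring
      have hexp : (((k : Int) + 1) - 1).toNat = k := by simp
      have hW : W n k + (10 - cur) * 10 ^ (((k : Int) + 1) - 1).toNat = W n (k + 1) := by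
        rw [hexp, hcur]
        have := W_step n k
        calc W n k + (10 - (((m0 % 10 : Nat) : Int) + 1)) * (10 : Int) ^ k
            = W n k + (10 - ((m0 % 10 : Nat) : Int) - 1) * (10 : Int) ^ k := by ring
          _ = W n (k + 1) := this
      rw [aLoop_step f _ _ _ _ _ hcont, hread, hs', hW]
      by_cases hm : 0 < m0 / 10
      · -- the write lands on the last digit of the prefix
        have hpre' : pre = revD (m0 / 10 / 10) ++ [((m0 / 10 % 10 : Nat) : Int)] := by
          rw [hpre, hdd]
          exact revD_def (m0 / 10) hm
        have hl2 : (pre.length : Int) = ((revD (m0 / 10 / 10)).length : Int) + 1 := by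
          rw [hpre']
          push_cast
          simp
        have hwidx : PySem.List.len (pre ++ cur :: rest) - ((k : Int) + 1 + 1)
            = ((revD (m0 / 10 / 10)).length : Int) := by
          rw [hlen, hl2]; ring
        have hassoc : pre ++ cur :: rest
            = revD (m0 / 10 / 10) ++ ((m0 / 10 % 10 : Nat) : Int) :: (cur :: rest) := by
          rw [hpre']; simp
        have hwrite : PySem.List.pySetD (pre ++ cur :: rest)
              (PySem.List.len (pre ++ cur :: rest) - ((k : Int) + 1 + 1))
              ((PySem.List.pyGet? (pre ++ cur :: rest)
                (PySem.List.len (pre ++ cur :: rest) - ((k : Int) + 1 + 1))).getD 0 + 1)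
            = revD (m0 / 10 / 10) ++ (((m0 / 10 % 10 : Nat) : Int) + 1) :: (cur :: rest) := by
          rw [hwidx]
          conv_lhs => rw [hassoc]
          rw [PySem.List.pyGet?_append_length, PySem.List.pySetD_natCast]
          simp only [Option.getD_some]
          exact set_append_len _ _ _ _
        rw [hwrite]
        have hfuel' : (Nat.digits 10 (n / 10 ^ (k + 1))).length + 1 ≤ f := by
          have hsd : Nat.digits 10 m0 = m0 % 10 :: Nat.digits 10 (m0 / 10) :=
            Nat.digits_def' (by norm_num : (1:Nat) < 10) hm0pos
          have hll : (Nat.digits 10 m0).length = (Nat.digits 10 (m0 / 10)).length + 1 := by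
            rw [hsd]; simp
          rw [hdd]
          omega
        have hIH := ih (k + 1) (cur :: rest) (by simp [hrest]) (by omega) hfuel'
        have hdd2 : n / 10 ^ (k + 1 + 1) = m0 / 10 / 10 := by
          rw [pow_succ, ← Nat.div_div_eq_div_mul, hdd]
        have hmod : n / 10 ^ (k + 1) % 10 = m0 / 10 % 10 := by rw [hdd]
        rw [hdd2, hmod, hdd] at hIH
        have hcast1 : ((k + 1 : Nat) : Int) + 1 = (k : Int) + 1 + 1 := by push_cast; ring
        rw [hcast1] at hIH
        rw [hIH]
        have hhA : hA t m0 = 10 * hA t (m0 / 10) + (9 - m0 % 10) := by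
          rw [hA, if_neg (by omega), if_neg (by omega)]
        rw [← W_step n k, hhA]
        have hle9 : n / 10 ^ k % 10 ≤ 9 := by omega
        simp only [hm0]
        push_cast [hle9]
        ring
      · -- no digits left above: the next test has s = 1 ≤ target and the loop stops
        have hm10 : m0 / 10 = 0 := by omega
        have hf1 : 1 ≤ f := by
          have hlen1 : 1 ≤ (Nat.digits 10 m0).length := by
            rw [Nat.digits_def' (by norm_num : (1:Nat) < 10) hm0pos]
            simp
          omega
        obtain ⟨f', rfl⟩ : ∃ f', f = f' + 1 := ⟨f - 1, by omega⟩
        rw [hm10, ds_zero]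
        rw [aLoop_exit _ _ _ _ _ _ (by push_cast; omega)]
        have hhA : hA t m0 = 10 * hA t (m0 / 10) + (9 - m0 % 10) := by
          rw [hA, if_neg (by omega), if_neg (by omega)]
        have hhA0 : hA t (m0 / 10) = 0 := by rw [hm10, hA]; simp
        rw [← W_step n k, hhA, hhA0]
        have hle9 : n / 10 ^ k % 10 ≤ 9 := by omega
        simp only [hm0]
        push_cast [hle9]
        ring
    · rw [aLoop_exit _ _ _ _ _ _ hcont]
      have hhA : hA t m0 = 0 := by
        rw [hA]
        by_cases h : m0 = 0
        · simp [h]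
        · rw [if_neg h, if_pos (by omega)]
      rw [hhA]
      push_cast
      ring

-- bridge: Nat.toDigits is the reversed digit list
lemma toDigitsCore_eq : ∀ (f m : Nat) (l : List Char), 0 < m → m < f →
    Nat.toDigitsCore 10 f m l = ((Nat.digits 10 m).map Nat.digitChar).reverse ++ l := by
  intro f
  induction f with
  | zero => intro m l h1 h2; omega
  | succ f ih =>
    intro m l h1 h2
    rw [Nat.toDigitsCore]
    by_cases h : m / 10 = 0
    · rw [if_pos h]
      rw [Nat.digits_def' (by norm_num : (1:Nat) < 10) h1, h, Nat.digits_zero]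
      simp
    · rw [if_neg h]
      rw [ih (m / 10) _ (by omega) (by omega)]
      rw [Nat.digits_def' (by norm_num : (1:Nat) < 10) h1]
      simp

lemma pvCharInt_digitChar (d : Nat) (h : d < 10) : pvCharInt (Nat.digitChar d) = (d : Int) := by
  unfold pvCharInt
  interval_cases d <;> decide

-- list(map(int, str(n))) is revD for positive n
lemma toDigits_bridge (m : Nat) (hm : 0 < m) :
    (Nat.toDigits 10 m).map pvCharInt = revD m := by
  unfold Nat.toDigits
  rw [toDigitsCore_eq (m + 1) m [] hm (by omega)]
  unfold revD
  rw [List.append_nil, ← List.map_reverse, List.map_map]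
  apply List.map_congr_left
  intro d hd
  have : d < 10 := Nat.digits_lt_base (by norm_num) (List.mem_reverse.mp hd)
  exact pvCharInt_digitChar d this

-- ===== VERDICT (by name: the statement is the Claim_ definition above) =====
theorem makeIntegerBeautiful_spec : Claim_equal_makeIntegerBeautiful := by
  intro n target _ hpre
  obtain ⟨hn, ht⟩ := hpre
  unfold Spec_makeIntegerBeautiful
  set nN := n.toNat with hnN
  have hn' : (nN : Int) = n := Int.toNat_of_nonneg hn
  have hB : makeIntegerBeautiful_alt n target = (gB target nN : Int) - nN := by
    unfold makeIntegerBeautiful_alt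
    rw [← hn', Int.toNat_natCast]
    have := bLoop_eq target ht nN (nN + 1) 0 (by simp)
    simp only [pow_zero, Nat.add_sub_cancel, Nat.div_one] at this
    rw [this]
    simp
  unfold makeIntegerBeautiful
  rw [hB]
  have hnneg : ¬ n < 0 := by omega
  rcases Nat.eq_zero_or_pos nN with h0 | hpos
  · -- n = 0
    have hn0 : n = 0 := by omega
    subst hn0
    rw [h0]
    have hg0 : gB target 0 = 0 := by
      rw [gB, if_pos (by norm_num)]
      split <;> rfl
    simp only [PySem.Int.toChars, if_neg (by omega : ¬ (0:Int) < 0), Int.toNat_zero,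
      Nat.toDigits_zero]
    have hchar : pvCharInt '0' = 0 := by decide
    simp only [List.map_cons, List.map_nil, hchar, List.sum_cons, List.sum_nil, add_zero]
    rw [if_pos (by omega : (0:Int) ≤ target), hg0]
    norm_num
  · -- n ≥ 1
    have htc : PySem.Int.toChars n = Nat.toDigits 10 nN := by
      unfold PySem.Int.toChars
      rw [if_neg hnneg, ← hnN]
    rw [htc, toDigits_bridge nN hpos]
    simp only [revD_sum]
    by_cases hsum : (ds nN : Int) ≤ target
    · rw [if_pos hsum]
      have hg : gB target nN = nN := by
        rw [gB]
        by_cases h1 : nN ≤ 1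
        · rw [if_pos h1, if_pos hsum]
        · rw [if_neg h1, if_pos hsum]
      rw [hg]; omega
    · rw [if_neg hsum]
      -- the first loop iteration (k = 0)
      have hsplit : revD nN = revD (nN / 10) ++ [((nN % 10 : Nat) : Int)] := revD_def nN hpos
      have hds0 : ds nN = nN % 10 + ds (nN / 10) := ds_def nN hpos
      have hlen : PySem.List.len (revD nN) = ((revD (nN / 10)).length : Int) + 1 := by
        have hl : (revD nN).length = (revD (nN / 10)).length + 1 := by
          rw [hsplit]; simp
        rw [PySem.List.len_eq, hl]
        push_cast
        ring
      have hread : (PySem.List.pyGet? (revD nN) (PySem.List.len (revD nN) - 1)).getD 0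
          = ((nN % 10 : Nat) : Int) := by
        have hidx : PySem.List.len (revD nN) - 1 = ((revD (nN / 10)).length : Int) := by
          rw [hlen]; ring
        rw [hidx]
        conv_lhs => rw [hsplit]
        rw [PySem.List.pyGet?_append_length]
        rfl
      have hs' : (ds nN : Int) - ((nN % 10 : Nat) : Int) + 1 = (ds (nN / 10) : Int) + 1 := by
        push_cast [hds0]; ring
      have ht' : (0 : Int) + (10 - ((nN % 10 : Nat) : Int)) * 10 ^ (((1:Int)) - 1).toNat
          = W nN 1 := by
        unfold W
        have h10 : nN / 10 ^ 1 = nN / 10 := by norm_num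
        rw [h10]
        have hnm : nN = 10 * (nN / 10) + nN % 10 := by omega
        push_cast
        omega
      rw [aLoop_step _ _ _ _ _ _ (by omega), hread, hs', ht']
      have hA1 : aLoop (revD nN).length
            (PySem.List.pySetD (revD nN) (PySem.List.len (revD nN) - (1 + 1))
              ((PySem.List.pyGet? (revD nN) (PySem.List.len (revD nN) - (1 + 1))).getD 0 + 1))
            ((ds (nN / 10) : Int) + 1) (1 + 1) (W nN 1) target
          = (10 : Int) * (hA target (nN / 10) : Int) + W nN 1 := by
        by_cases hm : 0 < nN / 10
        · -- write lands inside the digit prefix; use aLoop_eq at k = 1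
          have hsplit2 : revD (nN / 10) = revD (nN / 10 / 10) ++ [((nN / 10 % 10 : Nat) : Int)] :=
            revD_def (nN / 10) hm
          have hassoc : revD nN
              = revD (nN / 10 / 10) ++ ((nN / 10 % 10 : Nat) : Int) :: [((nN % 10 : Nat) : Int)] := by
            rw [hsplit, hsplit2]; simp
          have hl2 : ((revD (nN / 10)).length : Int) = ((revD (nN / 10 / 10)).length : Int) + 1 := by
            rw [hsplit2]
            push_cast
            simp
          have hwidx : PySem.List.len (revD nN) - (1 + 1)
              = ((revD (nN / 10 / 10)).length : Int) := by
            rw [hlen, hl2]; ring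
          have hwrite : PySem.List.pySetD (revD nN) (PySem.List.len (revD nN) - (1 + 1))
                ((PySem.List.pyGet? (revD nN) (PySem.List.len (revD nN) - (1 + 1))).getD 0 + 1)
              = revD (nN / 10 / 10)
                  ++ (((nN / 10 % 10 : Nat) : Int) + 1) :: [((nN % 10 : Nat) : Int)] := by
            rw [hwidx]
            conv_lhs => rw [hassoc]
            rw [PySem.List.pyGet?_append_length, PySem.List.pySetD_natCast]
            simp only [Option.getD_some]
            exact set_append_len _ _ _ _
          rw [hwrite]
          have hfuel : (Nat.digits 10 (nN / 10 ^ 1)).length + 1 ≤ (revD nN).length := by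
            have hsd : Nat.digits 10 nN = nN % 10 :: Nat.digits 10 (nN / 10) :=
              Nat.digits_def' (by norm_num : (1:Nat) < 10) hpos
            unfold revD
            rw [hsd]
            simp
          have hIH := aLoop_eq target ht nN ((revD nN).length) 1 [((nN % 10 : Nat) : Int)]
            (by simp) (by norm_num) hfuel
          have e1 : nN / 10 ^ (1 + 1) = nN / 10 / 10 := by
            rw [pow_succ, ← Nat.div_div_eq_div_mul]
            norm_num
          have e2 : nN / 10 ^ 1 = nN / 10 := by norm_num
          rw [e1, e2] at hIH
          have e3 : ((1 : Nat) : Int) + 1 = 1 + 1 := by norm_num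
          rw [e3] at hIH
          have e4 : (10 : Int) ^ 1 = 10 := by norm_num
          rw [e4] at hIH
          exact hIH
        · -- single-digit n: the write wraps to the last element, then the loop stops
          have hm0 : nN / 10 = 0 := by omega
          rw [hm0, ds_zero]
          have hlen1 : (revD nN).length = 1 := by
            rw [hsplit, hm0, revD_zero]
            simp
          rw [hlen1]
          rw [aLoop_exit _ _ _ _ _ _ (by push_cast; omega)]
          have hhA0 : hA target 0 = 0 := by rw [hA]; simp
          rw [hhA0]
          push_cast
          ring
      rw [hA1]
      -- connect with B via the g/h correspondence
      have hm2 : 2 ≤ nN := by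
        by_contra h
        push_neg at h
        interval_cases nN
        rw [ds_small 1 (by norm_num)] at hsum
        push_cast at hsum
        omega
      have hgstep : gB target nN = 10 * gB target ((nN + 9) / 10) := by
        rw [gB, if_neg (by omega), if_neg hsum]
      have hW1 : W nN 1 = ((nN / 10 + 1 : Nat) : Int) * 10 - nN := by
        unfold W
        norm_num
      by_cases h0 : nN % 10 = 0
      · have hq : (nN + 9) / 10 = nN / 10 := by omega
        have hds10 : ds (nN / 10) = ds nN := by omega
        have hbig : target < (ds (nN / 10) : Int) := by rw [hds10]; omega
        have hgb : gB target (nN / 10) = nN / 10 + 1 + hA target (nN / 10) :=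
          gB_eq_of_big target ht (nN / 10) hbig
        rw [hgstep, hq, hgb, hW1]
        push_cast
        ring
      · have hq : (nN + 9) / 10 = nN / 10 + 1 := by omega
        have hgb : gB target (nN / 10 + 1) = nN / 10 + 1 + hA target (nN / 10) :=
          gB_succ_eq target ht (nN / 10)
        rw [hgstep, hq, hgb, hW1]
        push_cast
        ring
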